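-- pv_equiv track=rewrite | github.com/Crylord-zx/aetherrecon | src/aetherrecon/engines/correlation_engine.py | _detect_cloud_infra
-- ===== SOURCE A (Python) =====
-- def _detect_cloud_infra(ctx: dict) -> bool:
--     """Detect cloud infrastructure indicators."""
--     cloud_indicators = [
--         "amazonaws.com", "azurewebsites.net", "cloudfront.net",
--         "googleapis.com", "firebaseio.com", "herokuapp.com",
--         "digitaloceanspaces.com", "blob.core.windows.net",
--     ]
--     subdomains = ctx.get("subdomains", [])
--     ips = ctx.get("ips", [])
--     all_hosts = subdomains + ips
--     return any(
--         any(ci in str(h).lower() for ci in cloud_indicators)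
--         for h in all_hosts
--     )
-- ===== SOURCE B (Python) =====
-- def _detect_cloud_infra(ctx: dict) -> bool:
--     """Detect cloud infrastructure indicators."""
--     indicators = {
--         "amazonaws.com", "azurewebsites.net", "cloudfront.net",
--         "googleapis.com", "firebaseio.com", "herokuapp.com",
--         "digitaloceanspaces.com", "blob.core.windows.net",
--     }
--     # Rabin-Karp-style window extraction: instead of searching each indicator
--     # in each host, slide windows of the (few) indicator lengths over every
--     # lowercased host and test each window against the indicator hash set.
--     lengths = sorted({len(ci) for ci in indicators})
--     for h in ctx.get("subdomains", []) + ctx.get("ips", []):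
--         s = str(h).lower()
--         n = len(s)
--         for length in lengths:
--             for i in range(n - length + 1):
--                 if s[i:i + length] in indicators:
--                     return True
--     return False
-- ===== Notes on version B (the rewrite author's own statement) =====
-- stated objective: alternative
-- what changed: B replaces A's per-indicator substring search inside each host by a Rabin-Karp-style window scan: the 8 indicators go into a hash set, the distinct indicator lengths are collected, and every fixed-length window of each lowercased host is tested against the set in one O(1)-expected lookup.
import Mathlib
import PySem

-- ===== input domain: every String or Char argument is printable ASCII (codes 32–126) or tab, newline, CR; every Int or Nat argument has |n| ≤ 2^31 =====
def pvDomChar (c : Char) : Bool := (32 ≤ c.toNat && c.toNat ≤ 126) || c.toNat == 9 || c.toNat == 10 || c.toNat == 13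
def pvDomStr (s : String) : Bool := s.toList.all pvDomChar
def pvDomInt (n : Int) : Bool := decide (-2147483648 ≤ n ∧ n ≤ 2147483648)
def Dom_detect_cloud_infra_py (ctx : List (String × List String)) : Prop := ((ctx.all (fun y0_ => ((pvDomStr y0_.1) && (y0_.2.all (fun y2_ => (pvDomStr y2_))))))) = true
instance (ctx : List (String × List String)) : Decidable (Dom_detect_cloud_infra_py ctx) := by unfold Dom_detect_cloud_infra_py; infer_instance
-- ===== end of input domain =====

-- B replaces A's per-indicator substring search by a Rabin-Karp-style window scan: all fixed-length
-- windows of each lowercased host are tested against a hash set of the indicators (objective: alternative).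

-- ===== PORT A =====
def detect_cloud_infra_py (ctx : List (String × List String)) : Bool :=
  let cloud_indicators : List String :=
    ["amazonaws.com", "azurewebsites.net", "cloudfront.net",
     "googleapis.com", "firebaseio.com", "herokuapp.com",
     "digitaloceanspaces.com", "blob.core.windows.net"]
  let subdomains := PySem.Dict.getD ⟨ctx⟩ "subdomains" []
  let ips := PySem.Dict.getD ⟨ctx⟩ "ips" []
  let all_hosts := subdomains ++ ips
  all_hosts.any (fun h => cloud_indicators.any (fun ci => PySem.Str.isIn ci (PySem.Str.lower h)))

-- ===== PORT B =====
def detect_cloud_infra_py_alt (ctx : List (String × List String)) : Bool :=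
  let indicators : PySem.Set String := PySem.Set.ofList
    ["amazonaws.com", "azurewebsites.net", "cloudfront.net",
     "googleapis.com", "firebaseio.com", "herokuapp.com",
     "digitaloceanspaces.com", "blob.core.windows.net"]
  let lengths := PySem.List.sorted (PySem.Set.ofList (indicators.map (fun ci => PySem.Str.len ci))) (fun x => x) false
  let hosts := PySem.Dict.getD ⟨ctx⟩ "subdomains" [] ++ PySem.Dict.getD ⟨ctx⟩ "ips" []
  hosts.any (fun h =>
    let s := PySem.Str.lower h
    lengths.any (fun length =>
      (PySem.List.pyRange 0 (PySem.Str.len s - length + 1) 1).any (fun i =>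
        PySem.Set.contains indicators (PySem.Str.slice s (some i) (some (i + length))))))

-- ===== PRECONDITION & SPEC =====
def Spec_detect_cloud_infra_py (ctx : List (String × List String)) (out : Bool) : Prop := out = detect_cloud_infra_py_alt ctx
instance (ctx : List (String × List String)) (out : Bool) : Decidable (Spec_detect_cloud_infra_py ctx out) := by unfold Spec_detect_cloud_infra_py; infer_instance

-- ===== CLAIM (what is proved, stated in full; the proofs are below) =====
def Claim_equal_detect_cloud_infra_py : Prop := ∀ (ctx : List (String × List String)), Dom_detect_cloud_infra_py ctx → Spec_detect_cloud_infra_py ctx (detect_cloud_infra_py ctx)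

-- ===== LEMMAS AND PROOFS =====

-- any window (drop-then-take) of a list is an infix of it
theorem pv_window_infix {α : Type} (l : List α) (n m : Nat) :
    (l.drop n).take m <:+: l :=
  (List.take_prefix m (l.drop n)).isInfix.trans (List.drop_suffix n l).isInfix

-- an infix occurs as a window at some in-range position
theorem pv_infix_window {α : Type} {cs l : List α} (h : cs <:+: l) :
    ∃ n : Nat, n + cs.length ≤ l.length ∧ (l.drop n).take cs.length = cs := by
  obtain ⟨as, bs, rfl⟩ := h
  refine ⟨as.length, by simp, ?_⟩
  rw [List.append_assoc, List.drop_left, List.take_left]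

-- ===== VERDICT (by name: the statement is the Claim_ definition above) =====
set_option maxHeartbeats 1000000 in
theorem detect_cloud_infra_py_spec : Claim_equal_detect_cloud_infra_py := by
  intro ctx _
  unfold Spec_detect_cloud_infra_py detect_cloud_infra_py detect_cloud_infra_py_alt
  set inds : List String :=
    ["amazonaws.com", "azurewebsites.net", "cloudfront.net",
     "googleapis.com", "firebaseio.com", "herokuapp.com",
     "digitaloceanspaces.com", "blob.core.windows.net"] with hi
  have hset : PySem.Set.ofList inds = inds := by decide
  have hlens : PySem.List.sorted (PySem.Set.ofList (inds.map (fun ci => PySem.Str.len ci))) (fun x => x) false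
      = ([13, 14, 17, 21, 22] : List Int) := by decide
  simp only [hset, hlens]
  congr 1
  funext h
  set s := PySem.Str.lower h with hs
  rw [Bool.eq_iff_iff]
  simp only [List.any_eq_true]
  constructor
  · -- A finds indicator ci as substring ⇒ B finds it as a window
    rintro ⟨ci, hci, hin⟩
    rw [PySem.Str.isIn_iff_infix] at hin
    obtain ⟨n, hn, hw⟩ := pv_infix_window hin
    refine ⟨(ci.toList.length : Int), ?_, (n : Int), ?_, ?_⟩
    · have : ∀ x ∈ inds, ((x.toList.length : Int)) ∈ ([13, 14, 17, 21, 22] : List Int) := by decide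
      exact this ci hci
    · rw [PySem.List.mem_pyRange_one]
      simp only [PySem.Str.len_eq]
      omega
    · have hsl : (PySem.Str.slice s (some (n : Int)) (some ((n : Int) + (ci.toList.length : Int)))).toList
          = ci.toList := by
        rw [PySem.Str.toList_slice]
        show PySem.List.slice s.toList _ _ = _
        rw [PySem.List.slice_toNat _ (by positivity) (by positivity)]
        have : (((n : Int) + (ci.toList.length : Int)).toNat - ((n : Int)).toNat) = ci.toList.length := by
          omega
        rw [this]
        simpa using hw
      have heq : PySem.Str.slice s (some (n : Int)) (some ((n : Int) + (ci.toList.length : Int))) = ci :=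
        String.toList_inj.mp hsl
      rw [heq]
      have : ∀ x ∈ inds, PySem.Set.contains inds x = true := by decide
      exact this ci hci
  · -- B finds a window in the set ⇒ A finds that indicator as substring
    rintro ⟨L, hL, i, hi', hw⟩
    set w := PySem.Str.slice s (some i) (some (i + L)) with hwdef
    have hwin : w ∈ inds := by
      have : ∀ x, PySem.Set.contains inds x = true → x ∈ inds := by
        intro x hx
        simpa [PySem.Set.contains] using hx
      exact this w hw
    refine ⟨w, hwin, ?_⟩
    rw [PySem.Str.isIn_iff_infix]
    rw [PySem.List.mem_pyRange_one] at hi'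
    have hLpos : (0 : Int) < L := by
      fin_cases hL <;> norm_num
    have hwl : w.toList = (s.toList.drop i.toNat).take ((i + L).toNat - i.toNat) := by
      rw [hwdef, PySem.Str.toList_slice]
      show PySem.List.slice s.toList _ _ = _
      rw [PySem.List.slice_toNat _ (by omega) (by omega)]
    rw [hwl]
    exact pv_window_infix _ _ _
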